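-- pv_equiv track=rewrite | github.com/sejin-yc/PET-Ner | pi_gateway/pi_gateway/src/webrtc_signaling_client.py | parse_stomp_message
-- ===== SOURCE A (Python) =====
-- def parse_stomp_message(msg: str):
--     """STOMP 메시지 파싱."""
--     lines = msg.split("\n")
--     command = lines[0] if lines else ""
--
--     # 본문 찾기
--     body_start = msg.find("\n\n")
--     if body_start == -1:
--         return command, None, None
--
--     headers_str = msg[:body_start]
--     body = msg[body_start + 2:].replace("\x00", "").strip()
--
--     # 헤더 파싱
--     headers = {}
--     for line in headers_str.split("\n")[1:]:
--         if ":" in line: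
--             key, value = line.split(":", 1)
--             headers[key.strip()] = value.strip()
--
--     return command, headers, body
-- ===== SOURCE B (Python) =====
-- def parse_stomp_message(msg: str):
--     """STOMP message parsing: one pass over the split lines instead of find+slicing."""
--     lines = msg.split("\n")
--     command = lines[0]
--     headers = {}
--     for j in range(1, len(lines) - 1):
--         line = lines[j]
--         if line == "":
--             body = "\n".join(lines[j + 1:]).replace("\x00", "").strip()
--             return command, headers, body
--         if ":" in line:
--             key, value = line.split(":", 1)
--             headers[key.strip()] = value.strip()
--     return command, None, None
-- ===== Notes on version B (the rewrite author's own statement) =====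
-- stated objective: alternative
-- what changed: Replaces the double-newline search plus string slicing and a second split with a single pass over the already-split lines: walk the interior lines, accumulate headers, and at the first empty line rejoin the remaining lines as the body.
import Mathlib
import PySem

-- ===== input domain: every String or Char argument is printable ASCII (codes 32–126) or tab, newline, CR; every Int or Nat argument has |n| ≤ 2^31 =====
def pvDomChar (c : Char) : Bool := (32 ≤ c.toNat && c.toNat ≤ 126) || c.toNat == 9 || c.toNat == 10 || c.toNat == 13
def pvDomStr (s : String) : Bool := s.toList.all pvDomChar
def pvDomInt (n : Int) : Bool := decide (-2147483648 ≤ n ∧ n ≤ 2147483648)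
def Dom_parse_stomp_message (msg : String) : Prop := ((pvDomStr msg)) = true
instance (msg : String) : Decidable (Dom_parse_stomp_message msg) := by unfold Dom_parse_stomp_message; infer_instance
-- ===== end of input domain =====

-- B replaces A's msg.find("\n\n") + slicing + second split by a single pass over the
-- already-split lines (headers accumulated until the first interior empty line, body rejoined);
-- objective: alternative (same O(n) cost, one traversal structure instead of find/slice/resplit).

-- ===== PORT A =====
def parse_stomp_message (msg : String) : String × (Option (List (String × String))) × Option String :=
  let lines := (PySem.Str.split? msg "\n").getD []
  let command := lines.headD ""  -- `lines[0] if lines else ""`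
  let body_start := PySem.Str.find msg "\n\n"
  if body_start == -1 then (command, none, none)
  else
    let headers_str := PySem.Str.slice msg none (some body_start)
    let body := PySem.Str.strip (PySem.Str.replace (PySem.Str.slice msg (some (body_start + 2)) none) "\x00" "")
    -- `key, value = line.split(":", 1)`: ":" in line guarantees exactly two parts,
    -- so the unpack is ported as parts[0] / parts[1]
    let headers := (((PySem.Str.split? headers_str "\n").getD []).drop 1).foldl
      (fun d line =>
        if PySem.Str.isIn ":" line then
          let parts := (PySem.Str.splitMax? line ":" 1).getD []
          d.insert (PySem.Str.strip (parts.headD "")) (PySem.Str.strip ((parts.drop 1).headD ""))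
        else d) (PySem.Dict.mk ([] : List (String × String)))
    (command, some headers.items, some body)

-- ===== PORT B =====
-- the for-loop of Source B: walks lines[1:], stops before the last line, accumulates headers,
-- and at the first empty line returns (headers, joined body)
def pvAltLoop (headers : PySem.Dict String String) (rest : List String) :
    (Option (List (String × String))) × Option String :=
  match rest with
  | [] => (none, none)
  | line :: tl =>
    if tl = [] then (none, none)
    else if line == "" then
      (some headers.items,
       some (PySem.Str.strip (PySem.Str.replace (PySem.Str.join "\n" tl) "\x00" "")))
    else
      pvAltLoop
        (if PySem.Str.isIn ":" line then
          -- `key, value = line.split(":", 1)` (two parts, as in Source B)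
          let parts := (PySem.Str.splitMax? line ":" 1).getD []
          headers.insert (PySem.Str.strip (parts.headD "")) (PySem.Str.strip ((parts.drop 1).headD ""))
        else headers) tl

def parse_stomp_message_alt (msg : String) : String × (Option (List (String × String))) × Option String :=
  let lines := (PySem.Str.split? msg "\n").getD []
  let command := lines.headD ""
  let hb := pvAltLoop (PySem.Dict.mk ([] : List (String × String))) (lines.drop 1)
  (command, hb.1, hb.2)

-- ===== PRECONDITION & SPEC =====
def Spec_parse_stomp_message (msg : String) (out : String × (Option (List (String × String))) × Option String) : Prop := out = parse_stomp_message_alt msg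
instance (msg : String) (out : String × (Option (List (String × String))) × Option String) : Decidable (Spec_parse_stomp_message msg out) := by unfold Spec_parse_stomp_message; infer_instance

-- ===== CLAIM (what is proved, stated in full; the proofs are below) =====
def Claim_equal_parse_stomp_message : Prop := ∀ (msg : String), Dom_parse_stomp_message msg → Spec_parse_stomp_message msg (parse_stomp_message msg)

-- ===== LEMMAS AND PROOFS =====

-- reference splitter: Python's s.split("\n") on char lists
def pvSplitNL : List Char → List (List Char)
  | [] => [[]]
  | c :: t => if c = '\n' then [] :: pvSplitNL t else (pvSplitNL t).modifyHead (c :: ·)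

-- reference joiner: "\n".join on char lists
def pvJoin : List (List Char) → List Char
  | [] => []
  | [l] => l
  | l :: m :: t => l ++ '\n' :: pvJoin (m :: t)

-- first interior empty line: some (pre, post) with t = pre ++ [] :: post, post ≠ []
def pvFirstSep : List (List Char) → Option (List (List Char) × List (List Char))
  | [] => none
  | l :: tl =>
    if l = [] ∧ tl ≠ [] then some ([], tl)
    else (pvFirstSep tl).map (fun pq => (l :: pq.1, pq.2))

-- no two adjacent newlines
def pvNoNN : List Char → Bool
  | [] => true
  | [_] => true
  | a :: b :: t => if a = '\n' ∧ b = '\n' then false else pvNoNN (b :: t)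

theorem pvSplitNL_ne_nil (cs : List Char) : pvSplitNL cs ≠ [] := by
  induction cs with
  | nil => simp [pvSplitNL]
  | cons c t ih =>
    by_cases h : c = '\n' <;> simp [pvSplitNL, h]
    cases hh : pvSplitNL t with
    | nil => exact absurd hh ih
    | cons a l => simp

theorem pvGo_nil (fuel : Nat) (cur : List Char) (acc : List (List Char)) :
    PySem.Chars.splitOn.go ['\n'] (fuel+1) [] cur acc = (cur.reverse :: acc).reverse := by
  rw [PySem.Chars.splitOn.go]
  simp

theorem pvGo_nl (fuel : Nat) (rest cur : List Char) (acc : List (List Char)) :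
    PySem.Chars.splitOn.go ['\n'] (fuel+1) ('\n' :: rest) cur acc
      = PySem.Chars.splitOn.go ['\n'] fuel rest [] (cur.reverse :: acc) := by
  rw [PySem.Chars.splitOn.go]
  simp [List.isPrefixOf]

theorem pvGo_cons (fuel : Nat) (c : Char) (rest cur : List Char) (acc : List (List Char))
    (h : c ≠ '\n') :
    PySem.Chars.splitOn.go ['\n'] (fuel+1) (c :: rest) cur acc
      = PySem.Chars.splitOn.go ['\n'] fuel rest (c :: cur) acc := by
  rw [PySem.Chars.splitOn.go]
  simp [List.isPrefixOf]
  intro hc; exact absurd hc.symm h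

theorem pvGo (cs : List Char) : ∀ (fuel : Nat) (cur : List Char) (acc : List (List Char)),
    cs.length < fuel →
    PySem.Chars.splitOn.go ['\n'] fuel cs cur acc
      = acc.reverse ++ (pvSplitNL cs).modifyHead (cur.reverse ++ ·) := by
  induction cs with
  | nil =>
    intro fuel cur acc h
    obtain ⟨f, rfl⟩ : ∃ f, fuel = f + 1 := ⟨fuel - 1, by omega⟩
    rw [pvGo_nil]
    simp [pvSplitNL, List.modifyHead]
  | cons c rest ih =>
    intro fuel cur acc h
    obtain ⟨f, rfl⟩ : ∃ f, fuel = f + 1 := ⟨fuel - 1, by omega⟩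
    by_cases hc : c = '\n'
    · subst hc
      rw [pvGo_nl, ih f [] (cur.reverse :: acc) (by simp at h; omega)]
      simp only [pvSplitNL, if_true]
      cases pvSplitNL rest <;> simp [List.modifyHead]
    · rw [pvGo_cons f c rest cur acc hc, ih f (c :: cur) acc (by simp at h; omega)]
      simp only [pvSplitNL, if_neg hc]
      cases pvSplitNL rest <;> simp [List.modifyHead]

theorem pvSplitOn_eq (cs : List Char) : PySem.Chars.splitOn cs ['\n'] = pvSplitNL cs := by
  rw [PySem.Chars.splitOn, pvGo cs (cs.length + 1) [] [] (by omega)]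
  cases pvSplitNL cs <;> simp [List.modifyHead]

theorem pvSplit_str (s : String) :
    (PySem.Str.split? s "\n").getD [] = (pvSplitNL s.toList).map String.ofList := by
  have h1 : ("\n" : String).toList = ['\n'] := by decide
  simp [PySem.Str.split?, PySem.Chars.split?, h1, pvSplitOn_eq]

theorem pvJoin_splitNL (cs : List Char) : pvJoin (pvSplitNL cs) = cs := by
  induction cs with
  | nil => simp [pvSplitNL, pvJoin]
  | cons c t ih =>
    by_cases h : c = '\n'
    · subst h
      simp only [pvSplitNL, if_true]
      cases hh : pvSplitNL t with
      | nil => exact absurd hh (pvSplitNL_ne_nil t)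
      | cons a l => rw [hh] at ih; simp [pvJoin, ih]
    · simp only [pvSplitNL, if_neg h]
      cases hh : pvSplitNL t with
      | nil => exact absurd hh (pvSplitNL_ne_nil t)
      | cons a l =>
        rw [hh] at ih
        cases l with
        | nil => simp only [List.modifyHead, pvJoin] at *; simp [ih]
        | cons b m => simp only [List.modifyHead, pvJoin] at *; simp [ih]

theorem pvSplitNL_no_nl (cs : List Char) : ∀ l ∈ pvSplitNL cs, '\n' ∉ l := by
  induction cs with
  | nil => simp [pvSplitNL]
  | cons c t ih =>
    by_cases h : c = '\n'
    · subst h; simp [pvSplitNL]; exact ih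
    · simp only [pvSplitNL, if_neg h]
      cases hh : pvSplitNL t with
      | nil => simp
      | cons a l =>
        rw [hh] at ih
        intro x hx
        simp only [List.modifyHead, List.mem_cons] at hx
        rcases hx with rfl | hx
        · intro hmem
          rcases List.mem_cons.mp hmem with rfl | hmem
          · exact h rfl
          · exact ih a (by simp) hmem
        · exact ih x (by simp [hx])

theorem pvHead_ne_nl (m : List Char) (h : '\n' ∉ m) : m.head? ≠ some '\n' := by
  cases m with
  | nil => simp
  | cons a u =>
    simp only [List.head?_cons, ne_eq, Option.some.injEq]
    intro hc; exact h (by simp [hc])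

-- prepend an N-free prefix onto cs: split of (l ++ cs) = modifyHead
theorem pvSplitNL_prepend (l : List Char) (cs : List Char) (h : '\n' ∉ l) :
    pvSplitNL (l ++ cs) = (pvSplitNL cs).modifyHead (l ++ ·) := by
  induction l with
  | nil =>
    rw [List.nil_append]
    cases pvSplitNL cs <;> simp [List.modifyHead]
  | cons a t ih =>
    have ha : a ≠ '\n' := by intro hx; exact h (by simp [hx])
    simp only [List.cons_append, pvSplitNL, if_neg ha]
    rw [ih (by intro hx; exact h (by simp [hx]))]
    cases pvSplitNL cs <;> simp [List.modifyHead]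

theorem pvSplitNL_join (pieces : List (List Char)) (hne : pieces ≠ [])
    (hfree : ∀ l ∈ pieces, '\n' ∉ l) : pvSplitNL (pvJoin pieces) = pieces := by
  induction pieces with
  | nil => exact absurd rfl hne
  | cons l t ih =>
    cases t with
    | nil =>
      have h0 : pvSplitNL (l ++ []) = [l] := by
        rw [pvSplitNL_prepend l [] (hfree l (by simp))]; simp [pvSplitNL, List.modifyHead]
      simpa [pvJoin] using h0
    | cons m tt =>
      simp only [pvJoin]
      rw [pvSplitNL_prepend l _ (hfree l (by simp))]
      simp only [pvSplitNL, if_true]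
      rw [ih (by simp) (fun x hx => hfree x (by simp [hx]))]
      simp [List.modifyHead]

theorem pvFirstSep_none (t : List (List Char)) (h : pvFirstSep t = none) :
    ∀ l ∈ t.dropLast, l ≠ [] := by
  induction t with
  | nil => simp
  | cons l tl ih =>
    rw [pvFirstSep] at h
    by_cases hcond : l = [] ∧ tl ≠ []
    · rw [if_pos hcond] at h; exact absurd h (by simp)
    · rw [if_neg hcond] at h
      have htl : pvFirstSep tl = none := by
        cases hx : pvFirstSep tl with
        | none => rfl
        | some pq => rw [hx] at h; simp at h
      intro x hx
      cases tl with
      | nil => simp at hx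
      | cons m tt =>
        rw [List.dropLast_cons_of_ne_nil (by simp)] at hx
        rcases List.mem_cons.mp hx with rfl | hx
        · intro hl; exact hcond ⟨hl, by simp⟩
        · exact ih htl x hx

theorem pvFirstSep_some (t : List (List Char)) :
    ∀ pre post, pvFirstSep t = some (pre, post) →
    t = pre ++ [] :: post ∧ (∀ l ∈ pre, l ≠ []) ∧ post ≠ [] := by
  induction t with
  | nil => intro pre post h; simp [pvFirstSep] at h
  | cons l tl ih =>
    intro pre post h
    rw [pvFirstSep] at h
    split_ifs at h with hcond
    · simp only [Option.some.injEq, Prod.mk.injEq] at h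
      obtain ⟨rfl, rfl⟩ := h
      exact ⟨by simp [hcond.1], by simp, hcond.2⟩
    · cases hx : pvFirstSep tl with
      | none => rw [hx] at h; simp at h
      | some pq =>
        rw [hx] at h
        simp only [Option.map_some, Option.some.injEq, Prod.mk.injEq] at h
        obtain ⟨h1, h2⟩ := h
        obtain ⟨ht, hp, hq⟩ := ih pq.1 pq.2 (by rw [hx])
        have htlne : tl ≠ [] := by rw [ht]; simp
        have hl : l ≠ [] := fun hle => hcond ⟨hle, htlne⟩
        refine ⟨?_, ?_, ?_⟩
        · rw [← h1, ← h2]; simp [ht]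
        · intro x hx2
          rw [← h1] at hx2
          rcases List.mem_cons.mp hx2 with rfl | hx2
          · exact hl
          · exact hp x hx2
        · rw [← h2]; exact hq

theorem pvNoNN_tail (a : Char) (t : List Char) (h : pvNoNN (a :: t) = true) :
    pvNoNN t = true := by
  cases t with
  | nil => rfl
  | cons b u => rw [pvNoNN] at h; split_ifs at h; exact h

theorem pvNoNN_drop (s : List Char) (h : pvNoNN s = true) :
    ∀ i, ¬ (['\n', '\n'] <+: s.drop i) := by
  induction s with
  | nil => intro i hp; simp at hp
  | cons a t ih =>
    intro i hp
    cases i with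
    | zero =>
      simp only [List.drop_zero] at hp
      obtain ⟨u, hu⟩ := hp
      cases hu
      simp [pvNoNN] at h
    | succ j => exact ih (pvNoNN_tail a t h) j (by simpa using hp)

theorem pvNoNN_prepend (l rest : List Char) (hl : '\n' ∉ l) (h : pvNoNN rest = true) :
    pvNoNN (l ++ rest) = true := by
  induction l with
  | nil => simpa
  | cons a t ih =>
    have ha : a ≠ '\n' := fun hx => hl (by simp [hx])
    have ht : pvNoNN (t ++ rest) = true := ih (fun hx => hl (by simp [hx]))
    cases hx : t ++ rest with
    | nil => rw [List.cons_append, hx]; rfl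
    | cons b u =>
      rw [List.cons_append, hx, pvNoNN, if_neg (by rintro ⟨h1, _⟩; exact ha h1)]
      rw [hx] at ht; exact ht

theorem pvNoNN_cons_nl (x : List Char) (hh : x.head? ≠ some '\n') (h : pvNoNN x = true) :
    pvNoNN ('\n' :: x) = true := by
  cases x with
  | nil => rfl
  | cons b u =>
    rw [pvNoNN, if_neg (by rintro ⟨_, h2⟩; exact hh (by simp [h2]))]
    exact h

theorem pvJoin_head_ne_nl (m : List Char) (tt : List (List Char)) (hfm : '\n' ∉ m)
    (hme : tt ≠ [] → m ≠ []) : (pvJoin (m :: tt)).head? ≠ some '\n' := by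
  cases tt with
  | nil => simpa [pvJoin] using pvHead_ne_nl m hfm
  | cons c u =>
    simp only [pvJoin]
    cases m with
    | nil => exact absurd rfl (hme (by simp))
    | cons a v =>
      simp only [List.cons_append, List.head?_cons, ne_eq, Option.some.injEq]
      intro hc; exact hfm (by simp [hc])

theorem pvNoNN_join (pieces : List (List Char)) (hfree : ∀ l ∈ pieces, '\n' ∉ l)
    (hmid : ∀ l ∈ pieces.tail.dropLast, l ≠ []) : pvNoNN (pvJoin pieces) = true := by
  induction pieces with
  | nil => rfl
  | cons l t ih =>
    cases t with
    | nil => simpa [pvJoin] using pvNoNN_prepend l [] (hfree l (by simp)) rfl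
    | cons m tt =>
      simp only [pvJoin]
      apply pvNoNN_prepend l _ (hfree l (by simp))
      have hrest : pvNoNN (pvJoin (m :: tt)) = true := by
        apply ih (fun x hx => hfree x (by simp [hx]))
        intro x hx
        apply hmid
        simp only [List.tail_cons] at hx ⊢
        cases tt with
        | nil => simp at hx
        | cons c u =>
          rw [List.dropLast_cons_of_ne_nil (by simp)]
          exact List.mem_cons_of_mem _ (by simpa using hx)
      refine pvNoNN_cons_nl _ ?_ hrest
      refine pvJoin_head_ne_nl m tt (hfree m (by simp)) ?_
      intro htt
      apply hmid
      simp only [List.tail_cons]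
      cases tt with
      | nil => exact absurd rfl htt
      | cons c u => rw [List.dropLast_cons_of_ne_nil (by simp)]; simp

theorem pvFind_eq_of (s : List Char) (p : Nat) (h1 : ['\n', '\n'] <+: s.drop p)
    (h2 : ∀ i < p, ¬ ['\n', '\n'] <+: s.drop i) :
    PySem.Chars.find s ['\n', '\n'] = (p : Int) := by
  have hinf : ['\n', '\n'] <:+: s := h1.isInfix.trans (List.drop_suffix p s).isInfix
  have hnn : 0 ≤ PySem.Chars.find s ['\n', '\n'] :=
    (PySem.Chars.find_nonneg_iff s ['\n', '\n']).mpr hinf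
  obtain ⟨hpre, hmin⟩ := PySem.Chars.find_spec hnn
  have heq : (PySem.Chars.find s ['\n', '\n']).toNat = p := by
    by_contra hne
    rcases Nat.lt_or_ge (PySem.Chars.find s ['\n', '\n']).toNat p with hlt | hge
    · exact h2 _ hlt hpre
    · exact hmin p (by omega) h1
  omega

theorem pvPrefix_take (sub X Y : List Char) (h : sub <+: X ++ Y) (h2 : sub.length ≤ X.length) :
    sub <+: X := by
  rw [List.prefix_iff_eq_take] at *
  rw [h, List.take_append_of_le_length h2, List.length_take, min_eq_left h2]

theorem pvAltLoop_none (t : List (List Char)) : ∀ (d : PySem.Dict String String),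
    pvFirstSep t = none → pvAltLoop d (t.map String.ofList) = (none, none) := by
  induction t with
  | nil => intro d _; rfl
  | cons l tl ih =>
    intro d h
    rw [pvFirstSep] at h
    by_cases hcond : l = [] ∧ tl ≠ []
    · rw [if_pos hcond] at h; exact absurd h (by simp)
    · rw [if_neg hcond] at h
      have htl : pvFirstSep tl = none := by
        cases hx : pvFirstSep tl with
        | none => rfl
        | some pq => rw [hx] at h; simp at h
      cases tl with
      | nil => rfl
      | cons m tt =>
        have hl : l ≠ [] := fun hx => hcond ⟨hx, by simp⟩
        rw [List.map_cons, pvAltLoop]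
        rw [if_neg (by simp)]
        rw [if_neg (by simpa using hl)]
        exact ih _ htl

theorem pvAltLoop_some (pre : List (List Char)) :
    ∀ (post : List (List Char)) (d : PySem.Dict String String),
    (∀ l ∈ pre, l ≠ []) → post ≠ [] →
    pvAltLoop d ((pre ++ [] :: post).map String.ofList)
      = (some ((pre.map String.ofList).foldl
          (fun d line =>
            if PySem.Str.isIn ":" line then
              let parts := (PySem.Str.splitMax? line ":" 1).getD []
              d.insert (PySem.Str.strip (parts.headD "")) (PySem.Str.strip ((parts.drop 1).headD ""))
            else d) d).items,
         some (PySem.Str.strip (PySem.Str.replace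
           (PySem.Str.join "\n" (post.map String.ofList)) "\x00" ""))) := by
  induction pre with
  | nil =>
    intro post d _ hpost
    rw [List.nil_append, List.map_cons, pvAltLoop]
    rw [if_neg (by simpa using hpost)]
    rw [if_pos (by decide)]
    rfl
  | cons l pre' ih =>
    intro post d hpre hpost
    rw [List.cons_append, List.map_cons, pvAltLoop]
    rw [if_neg (by simp)]
    rw [if_neg (by simpa using hpre l (by simp))]
    rw [ih post _ (fun x hx => hpre x (by simp [hx])) hpost]
    rfl

theorem pvJoin_eq_intercalate (ps : List (List Char)) :
    pvJoin ps = List.intercalate ['\n'] ps := by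
  induction ps with
  | nil => simp [pvJoin, List.intercalate]
  | cons l t ih =>
    cases t with
    | nil => simp [pvJoin, List.intercalate]
    | cons m tt =>
      simp only [pvJoin]
      rw [ih]
      simp [List.intercalate, List.intersperse]

theorem pvJoin_mid (X : List (List Char)) : ∀ Y, X ≠ [] → Y ≠ [] →
    pvJoin (X ++ [] :: Y) = pvJoin X ++ '\n' :: '\n' :: pvJoin Y := by
  induction X with
  | nil => intro Y hX _; exact absurd rfl hX
  | cons a X' ih =>
    intro Y hX hY
    cases X' with
    | nil =>
      cases Y with
      | nil => exact absurd rfl hY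
      | cons y ys => simp [pvJoin]
    | cons b X'' =>
      have h2 := ih Y (by simp) hY
      rw [List.cons_append]
      rw [show pvJoin (a :: (b :: X'' ++ [] :: Y)) = a ++ '\n' :: pvJoin (b :: X'' ++ [] :: Y) by
        cases X'' <;> rfl]
      rw [show (b :: X'' ++ [] :: Y) = ((b :: X'') ++ [] :: Y) from rfl, h2]
      simp [pvJoin]

theorem pvJoin_snoc_nil (X : List (List Char)) (hX : X ≠ []) :
    pvJoin (X ++ [[]]) = pvJoin X ++ ['\n'] := by
  induction X with
  | nil => exact absurd rfl hX
  | cons a X' ih =>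
    cases X' with
    | nil => simp [pvJoin]
    | cons b X'' =>
      have h2 := ih (by simp)
      rw [List.cons_append]
      rw [show pvJoin (a :: (b :: X'' ++ [[]])) = a ++ '\n' :: pvJoin (b :: X'' ++ [[]]) by
        cases X'' <;> rfl]
      rw [show (b :: X'' ++ [[]]) = ((b :: X'') ++ [[]]) from rfl, h2]
      simp [pvJoin]

-- ===== VERDICT (by name: the statement is the Claim_ definition above) =====
theorem parse_stomp_message_spec : Claim_equal_parse_stomp_message := by
  intro msg _dom
  show parse_stomp_message msg = parse_stomp_message_alt msg
  obtain ⟨l0, t, hls⟩ : ∃ l0 t, pvSplitNL msg.toList = l0 :: t := by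
    cases hx : pvSplitNL msg.toList with
    | nil => exact absurd hx (pvSplitNL_ne_nil _)
    | cons a b => exact ⟨a, b, rfl⟩
  have hfreeAll : ∀ l ∈ l0 :: t, '\n' ∉ l := by
    rw [← hls]; exact pvSplitNL_no_nl msg.toList
  have hjoin : pvJoin (l0 :: t) = msg.toList := by rw [← hls]; exact pvJoin_splitNL _
  have hNN : ("\n\n" : String).toList = ['\n', '\n'] := by decide
  simp only [parse_stomp_message, parse_stomp_message_alt, pvSplit_str, hls, List.map_cons,
    List.headD_cons, List.drop_succ_cons, List.drop_zero]
  cases hsep : pvFirstSep t with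
  | none =>
    have hfind : PySem.Str.find msg "\n\n" = -1 := by
      simp only [PySem.Str.find, hNN]
      rw [PySem.Chars.find_eq_neg_one_iff]
      intro hinf
      obtain ⟨u, v, huv⟩ := hinf
      have hp : ['\n', '\n'] <+: msg.toList.drop u.length := by
        rw [← huv]
        simp [List.append_assoc]
      refine pvNoNN_drop msg.toList ?_ u.length hp
      rw [← hjoin]
      exact pvNoNN_join (l0 :: t) hfreeAll (by simpa using pvFirstSep_none t hsep)
    rw [hfind]
    rw [pvAltLoop_none t _ hsep]
    simp
  | some pq =>
    obtain ⟨pre, post⟩ := pq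
    obtain ⟨ht, hpre, hpost⟩ := pvFirstSep_some t pre post hsep
    subst ht
    have hfree0 : '\n' ∉ l0 := hfreeAll l0 (by simp)
    have hfreePre : ∀ l ∈ l0 :: pre, '\n' ∉ l := by
      intro x hx
      rcases List.mem_cons.mp hx with rfl | hx
      · exact hfree0
      · exact hfreeAll x (by simp [hx])
    have hJ : msg.toList = pvJoin (l0 :: pre) ++ '\n' :: '\n' :: pvJoin post := by
      rw [← hjoin]
      rw [show (l0 :: (pre ++ [] :: post)) = ((l0 :: pre) ++ [] :: post) from rfl]
      exact pvJoin_mid (l0 :: pre) post (by simp) hpost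
    have hnoNN : pvNoNN (pvJoin (l0 :: pre) ++ ['\n']) = true := by
      rw [← pvJoin_snoc_nil (l0 :: pre) (by simp)]
      apply pvNoNN_join
      · intro x hx
        rcases List.mem_append.mp hx with hx | hx
        · exact hfreePre x hx
        · simp only [List.mem_singleton] at hx; subst hx; simp
      · rw [show (l0 :: pre) ++ [[]] = l0 :: (pre ++ [[]]) from rfl, List.tail_cons,
          List.dropLast_concat]
        exact hpre
    have hfind : PySem.Str.find msg "\n\n" = ((pvJoin (l0 :: pre)).length : Int) := by
      simp only [PySem.Str.find, hNN]
      apply pvFind_eq_of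
      · rw [hJ, List.drop_left]
        exact ⟨pvJoin post, rfl⟩
      · intro i hi hp2
        refine pvNoNN_drop _ hnoNN i ?_
        rw [hJ] at hp2
        rw [show pvJoin (l0 :: pre) ++ '\n' :: '\n' :: pvJoin post
              = (pvJoin (l0 :: pre) ++ ['\n']) ++ ('\n' :: pvJoin post) by simp] at hp2
        rw [List.drop_append_of_le_length (by simp; omega)] at hp2
        refine pvPrefix_take _ _ _ hp2 ?_
        simp
        omega
    rw [hfind]
    rw [if_neg (by simp only [beq_iff_eq]; omega)]
    rw [pvAltLoop_some pre post _ hpre hpost]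
    -- headers_str side
    have hslice1 : PySem.Str.slice msg none (some ((pvJoin (l0 :: pre)).length : Int))
        = String.ofList (pvJoin (l0 :: pre)) := by
      rw [PySem.Str.slice]
      congr 1
      rw [PySem.Chars.slice_eq_listSlice, PySem.List.slice_to_natCast]
      rw [hJ]
      rw [show pvJoin (l0 :: pre) ++ '\n' :: '\n' :: pvJoin post
            = pvJoin (l0 :: pre) ++ ('\n' :: '\n' :: pvJoin post) from rfl]
      exact List.take_left
    have hslice2 : PySem.Str.slice msg (some (((pvJoin (l0 :: pre)).length : Int) + 2)) none
        = String.ofList (pvJoin post) := by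
      rw [PySem.Str.slice]
      congr 1
      rw [PySem.Chars.slice_eq_listSlice]
      rw [show (((pvJoin (l0 :: pre)).length : Int) + 2) = (((pvJoin (l0 :: pre)).length + 2 : Nat) : Int) by push_cast; ring]
      rw [PySem.List.slice_from_natCast]
      rw [hJ]
      rw [show pvJoin (l0 :: pre) ++ '\n' :: '\n' :: pvJoin post
            = (pvJoin (l0 :: pre) ++ ['\n', '\n']) ++ pvJoin post by simp]
      rw [List.drop_append_of_le_length (by simp)]
      simp
    rw [hslice1, hslice2]
    have hsplit2 : pvSplitNL (String.ofList (pvJoin (l0 :: pre))).toList = l0 :: pre := by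
      rw [String.toList_ofList]
      exact pvSplitNL_join (l0 :: pre) (by simp) hfreePre
    rw [hsplit2]
    have hbody : String.ofList (pvJoin post) = PySem.Str.join "\n" (post.map String.ofList) := by
      rw [PySem.Str.join]
      congr 1
      rw [PySem.Chars.join]
      rw [show ("\n" : String).toList = ['\n'] by decide]
      rw [pvJoin_eq_intercalate]
      congr 1
      rw [List.map_map]
      rw [show (String.toList ∘ String.ofList) = id by funext l; simp]
      simp
    rw [hbody]
    simp
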